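-- pv_equiv track=rewrite | github.com/agilestar8/coding-test- | 프로그래머스 lv3/멀리뛰기.py | solution
-- ===== SOURCE A (Python) =====
-- def solution(n):
--
--     if n < 3:
--         return n
--
--     # DP
--     dp = [0]*(n+1)
--     dp[1] = 1       # 1칸가는 방법 1가지 ([1])
--     dp[2] = 2       # 2칸가는 방법 2가지 ([1,1],[2])
--     for i in range(3,n+1):
--         dp[i] = dp[i-1] + dp[i-2]
--
--     return dp[n]%1234567
-- ===== SOURCE B (Python) =====
-- def solution(n):
--     if n < 3:
--         return n
--     M = 1234567
--
--     def fib_pair(k):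
--         # returns (F(k) % M, F(k+1) % M) with F(0)=0, F(1)=1, by fast doubling
--         if k == 0:
--             return (0, 1)
--         a, b = fib_pair(k // 2)
--         c = a * (2 * b - a) % M
--         d = (a * a + b * b) % M
--         if k % 2 == 1:
--             return (d, (c + d) % M)
--         return (c, d)
--
--     # ways(n) = F(n+1)
--     return fib_pair(n + 1)[0]
-- ===== Notes on version B (the rewrite author's own statement) =====
-- stated objective: faster
-- what changed: Replaced the O(n) DP array of unreduced Fibonacci numbers with O(log n) fast-doubling Fibonacci reduced by the fixed modulus at every step.
import Mathlib
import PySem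

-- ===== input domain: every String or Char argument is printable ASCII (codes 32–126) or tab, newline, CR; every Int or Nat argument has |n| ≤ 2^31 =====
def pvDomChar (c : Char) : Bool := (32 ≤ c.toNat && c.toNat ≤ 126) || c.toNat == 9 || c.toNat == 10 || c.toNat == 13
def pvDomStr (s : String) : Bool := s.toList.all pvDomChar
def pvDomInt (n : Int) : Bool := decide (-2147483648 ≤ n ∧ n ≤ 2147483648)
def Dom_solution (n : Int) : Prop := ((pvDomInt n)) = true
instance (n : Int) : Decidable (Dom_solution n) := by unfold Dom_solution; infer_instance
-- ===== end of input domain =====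

-- B replaces A's O(n) DP array of unreduced Fibonacci numbers by fast-doubling Fibonacci reduced modulo the task's fixed modulus (measured faster).


-- ===== PORT A =====
def solution (n : Int) : Int :=
  if n < 3 then n
  else
    let dp : List Int := List.replicate (n + 1).toNat 0   -- dp = [0]*(n+1)
    let dp := PySem.List.pySetD dp 1 1                    -- dp[1] = 1 (in range: n ≥ 3)
    let dp := PySem.List.pySetD dp 2 2                    -- dp[2] = 2 (in range)
    let dp := (PySem.List.pyRange 3 (n + 1) 1).foldl
      (fun dp i =>
        PySem.List.pySetD dp i
          (PySem.List.pyGetD dp (i - 1) 0 + PySem.List.pyGetD dp (i - 2) 0)) dp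
    PySem.Int.mod (PySem.List.pyGetD dp n 0) 1234567

-- ===== PORT B =====
-- fib_pair(k): (F(k) % M, F(k+1) % M) by fast doubling; Python recurses on k // 2 with k ≥ 0,
-- so the Nat index with Nat division is exact.
def fibPair (k : Nat) : Int × Int :=
  if h : k = 0 then (0, 1)
  else
    let p := fibPair (k / 2)
    let a := p.1
    let b := p.2
    let c := PySem.Int.mod (a * (2 * b - a)) 1234567
    let d := PySem.Int.mod (a * a + b * b) 1234567
    if k % 2 = 1 then (d, PySem.Int.mod (c + d) 1234567) else (c, d)
  termination_by k
  decreasing_by exact Nat.div_lt_self (Nat.pos_of_ne_zero h) (by omega)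


def solution_alt (n : Int) : Int :=
  if n < 3 then n
  else (fibPair (n + 1).toNat).1   -- fib_pair(n + 1)[0]

-- ===== PRECONDITION & SPEC =====
def Spec_solution (n : Int) (out : Int) : Prop := out = solution_alt n
instance (n : Int) (out : Int) : Decidable (Spec_solution n out) := by unfold Spec_solution; infer_instance

-- ===== CLAIM (what is proved, stated in full; the proofs are below) =====
def Claim_equal_solution : Prop := ∀ (n : Int), Dom_solution n → Spec_solution n (solution n)

-- ===== LEMMAS AND PROOFS =====

theorem modM (a : Int) : PySem.Int.mod a 1234567 = a % 1234567 :=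
  PySem.Int.mod_eq_emod_of_pos (by norm_num)

theorem fib_cast_two_mul (m : Nat) :
    ((Nat.fib (2*m) : Int)) = (Nat.fib m : Int) * (2 * (Nat.fib (m+1) : Int) - (Nat.fib m : Int)) := by
  have hle : Nat.fib m ≤ 2 * Nat.fib (m+1) := by
    have := Nat.fib_le_fib_succ (n := m); omega
  rw [Nat.fib_two_mul]
  push_cast [hle]
  ring

theorem fibPair_eq (k : Nat) :
    fibPair k = ((Nat.fib k : Int) % 1234567, (Nat.fib (k + 1) : Int) % 1234567) := by
  induction k using Nat.strong_induction_on with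
  | _ k ih =>
    rw [fibPair]
    by_cases h : k = 0
    · subst h; simp
    · simp only [h, dite_false]
      rw [ih (k / 2) (Nat.div_lt_self (Nat.pos_of_ne_zero h) (by omega))]
      simp only [modM]
      set m := k / 2 with hm
      set M : Int := 1234567 with hM
      have h1 : ((Nat.fib m : Int) % M) ≡ (Nat.fib m : Int) [ZMOD M] :=
        Int.emod_emod_of_dvd _ dvd_rfl
      have h2 : ((Nat.fib (m+1) : Int) % M) ≡ (Nat.fib (m+1) : Int) [ZMOD M] :=
        Int.emod_emod_of_dvd _ dvd_rfl
      have hc : ((Nat.fib m : Int) % M * (2 * ((Nat.fib (m+1) : Int) % M) - (Nat.fib m : Int) % M)) % M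
          = (Nat.fib (2*m) : Int) % M := by
        rw [fib_cast_two_mul m]
        exact h1.mul (((Int.ModEq.refl 2).mul h2).sub h1)
      have hd : ((Nat.fib m : Int) % M * ((Nat.fib m : Int) % M) + (Nat.fib (m+1) : Int) % M * ((Nat.fib (m+1) : Int) % M)) % M
          = (Nat.fib (2*m+1) : Int) % M := by
        have : ((Nat.fib (2*m+1) : Int)) = (Nat.fib m : Int) * (Nat.fib m : Int) + (Nat.fib (m+1) : Int) * (Nat.fib (m+1) : Int) := by
          rw [Nat.fib_two_mul_add_one]; push_cast; ring
        rw [this]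
        exact (h1.mul h1).add (h2.mul h2)
      by_cases hodd : k % 2 = 1
      · have hk : k = 2*m + 1 := by omega
        simp only [hodd, if_true]
        rw [hc, hd]
        have hsum : ((Nat.fib (2*m) : Int) % M + (Nat.fib (2*m+1) : Int) % M) % M
            = (Nat.fib (2*m+2) : Int) % M := by
          have : ((Nat.fib (2*m+2) : Int)) = (Nat.fib (2*m) : Int) + (Nat.fib (2*m+1) : Int) := by
            rw [Nat.fib_add_two]; push_cast; ring
          rw [this]
          have e1 : ((Nat.fib (2*m) : Int) % M) ≡ (Nat.fib (2*m) : Int) [ZMOD M] :=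
            Int.emod_emod_of_dvd _ dvd_rfl
          have e2 : ((Nat.fib (2*m+1) : Int) % M) ≡ (Nat.fib (2*m+1) : Int) [ZMOD M] :=
            Int.emod_emod_of_dvd _ dvd_rfl
          exact e1.add e2
        rw [hsum, hk]
      · have hk : k = 2*m := by omega
        simp only [hodd, if_false]
        rw [hc, hd, hk]

theorem loopA (N : Nat) (hN : 3 ≤ N) (m : Nat) (h2 : 2 ≤ m) (hmN : m ≤ N) :
    (((PySem.List.pyRange 3 ((m:Int)+1) 1).foldl
        (fun dp i => PySem.List.pySetD dp i
          (PySem.List.pyGetD dp (i-1) 0 + PySem.List.pyGetD dp (i-2) 0))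
        (((List.replicate (N+1) (0:Int)).set 1 1).set 2 2)).length = N+1)
    ∧ ∀ j : Nat, 1 ≤ j → j ≤ m →
      ((PySem.List.pyRange 3 ((m:Int)+1) 1).foldl
        (fun dp i => PySem.List.pySetD dp i
          (PySem.List.pyGetD dp (i-1) 0 + PySem.List.pyGetD dp (i-2) 0))
        (((List.replicate (N+1) (0:Int)).set 1 1).set 2 2))[j]? = some ((Nat.fib (j+1) : Int)) := by
  induction m, h2 using Nat.le_induction with
  | base =>
    rw [PySem.List.pyRange_one_eq_nil (by norm_num)]
    simp only [List.foldl_nil]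
    constructor
    · simp
    · intro j h1 hj2
      interval_cases j
      · rw [List.getElem?_set_ne (by omega), List.getElem?_set_self (by simpa using by omega)]
        norm_num [Nat.fib]
      · rw [List.getElem?_set_self (by simpa using by omega)]
        norm_num [Nat.fib]
  | succ m hm ih =>
    obtain ⟨ihlen, ihval⟩ := ih (by omega)
    have hsplit : PySem.List.pyRange 3 (((m+1 : Nat) : Int)+1) 1
        = PySem.List.pyRange 3 ((m:Int)+1) 1 ++ [(m:Int)+1] := by
      push_cast
      rw [show ((m:Int)+1+1) = ((m:Int)+1)+1 by ring]
      exact PySem.List.pyRange_one_succ_right (by omega)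
    rw [hsplit, List.foldl_append]
    set dp := ((PySem.List.pyRange 3 ((m:Int)+1) 1).foldl
        (fun dp i => PySem.List.pySetD dp i
          (PySem.List.pyGetD dp (i-1) 0 + PySem.List.pyGetD dp (i-2) 0))
        (((List.replicate (N+1) (0:Int)).set 1 1).set 2 2)) with hdp
    simp only [List.foldl_cons, List.foldl_nil]
    have hi1 : ((m:Int)+1-1) = ((m:Nat) : Int) := by ring
    have hi2 : ((m:Int)+1-2) = (((m-1 : Nat)) : Int) := by push_cast [Nat.cast_sub (by omega : 1 ≤ m)]; ring
    have hset : ((m:Int)+1) = (((m+1 : Nat)) : Int) := by push_cast; ring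
    rw [hi1, hi2, hset, PySem.List.pySetD_natCast]
    have hg1 : PySem.List.pyGetD dp ((m:Nat) : Int) 0 = (Nat.fib (m+1) : Int) := by
      rw [PySem.List.pyGetD_natCast, List.getD_eq_getElem?_getD, ihval m (by omega) (by omega)]
      rfl
    have hg2 : PySem.List.pyGetD dp (((m-1 : Nat)) : Int) 0 = (Nat.fib m : Int) := by
      rw [PySem.List.pyGetD_natCast, List.getD_eq_getElem?_getD, ihval (m-1) (by omega) (by omega)]
      rw [show m - 1 + 1 = m by omega]
      rfl
    rw [hg1, hg2]
    constructor
    · simp [ihlen]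
    · intro j h1 hj2
      by_cases hj : j = m + 1
      · subst hj
        rw [List.getElem?_set_self (by omega)]
        have hfib : ((Nat.fib (m+1+1) : Int)) = (Nat.fib (m+1) : Int) + (Nat.fib m : Int) := by
          rw [Nat.fib_add_two]; push_cast; ring
        rw [hfib]
      · rw [List.getElem?_set_ne (by omega)]
        exact ihval j h1 (by omega)


theorem final (n : Int) : solution n = solution_alt n := by
  by_cases h : n < 3
  · simp [solution, solution_alt, h]
  · have hN3 : 3 ≤ n.toNat := by omega
    set N := n.toNat with hNdef
    have hn : n = (N : Int) := by omega
    have htn : (n + 1).toNat = N + 1 := by omega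
    rw [solution, solution_alt, if_neg h, if_neg h]
    simp only [htn]
    have e1 : PySem.List.pySetD (List.replicate (N+1) (0:Int)) 1 1
        = (List.replicate (N+1) (0:Int)).set 1 1 := by
      rw [PySem.List.pySetD_of_nonneg _ _ (by norm_num)]; norm_num
    have e2 : PySem.List.pySetD ((List.replicate (N+1) (0:Int)).set 1 1) 2 2
        = ((List.replicate (N+1) (0:Int)).set 1 1).set 2 2 := by
      rw [PySem.List.pySetD_of_nonneg _ _ (by norm_num)]; rfl
    rw [e1, e2]
    obtain ⟨hlen, hval⟩ := loopA N hN3 N (by omega) (le_refl N)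
    rw [show n + 1 = (N : Int) + 1 by omega]
    rw [hn, PySem.List.pyGetD_natCast, List.getD_eq_getElem?_getD, hval N (by omega) (le_refl N)]
    rw [fibPair_eq (N+1), modM]
    rfl

-- ===== VERDICT (by name: the statement is the Claim_ definition above) =====
theorem solution_spec : Claim_equal_solution := by
  intro n _
  unfold Spec_solution
  exact final n
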